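-- pv_equiv track=rewrite | github.com/omikad/omikad-stuff | Pythoning/problems/codejam/2009/all_your_base_1ca.py | solve
-- ===== SOURCE A (Python) =====
-- def solve(s):
--     digits = set(s)
--     base = max(2, len(digits))
--
--     numbers = {s[0]: 1}
--
--     zero_found = False
--     last = 1
--
--     result = 1
--
--     for ci in range(1, len(s)):
--         c = s[ci]
--
--         if c in numbers:
--             digit = numbers[c]
--
--         elif zero_found:
--             last += 1
--             numbers[c] = last
--             digit = last
--
--         else:
--             numbers[c] = 0
--             digit = 0
--             zero_found = True
--
--         result = result * base + digit
--
--     return result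
-- ===== SOURCE B (Python) =====
-- def solve(s):
--     base = max(2, len(set(s)))
--     # reverse pass: accumulate, per character, the sum of base-powers of its positions
--     weight = {}
--     p = 1
--     for c in reversed(s):
--         weight[c] = weight.get(c, 0) + p
--         p *= base
--     # digit values by first appearance (s[0] -> 1, next distinct -> 0, then 2,3,...):
--     # the answer is the sum over DISTINCT characters of value * positional weight
--     total = 0
--     for k, c in enumerate(dict.fromkeys(s)):
--         v = 1 if k == 0 else (0 if k == 1 else k)
--         total += v * weight[c]
--     return total
-- ===== Notes on version B (the rewrite author's own statement) =====
-- stated objective: alternative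
-- what changed: B evaluates the number by a different algorithm: a reverse pass accumulates for each character the sum of base-powers of its positions (a weight dict), and the result is the sum over distinct characters of digit-value times weight, instead of A's single left-to-right Horner loop that grows the digit dict, a zero-found flag, a next-digit counter and the running result in one interleaved state.
import Mathlib
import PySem

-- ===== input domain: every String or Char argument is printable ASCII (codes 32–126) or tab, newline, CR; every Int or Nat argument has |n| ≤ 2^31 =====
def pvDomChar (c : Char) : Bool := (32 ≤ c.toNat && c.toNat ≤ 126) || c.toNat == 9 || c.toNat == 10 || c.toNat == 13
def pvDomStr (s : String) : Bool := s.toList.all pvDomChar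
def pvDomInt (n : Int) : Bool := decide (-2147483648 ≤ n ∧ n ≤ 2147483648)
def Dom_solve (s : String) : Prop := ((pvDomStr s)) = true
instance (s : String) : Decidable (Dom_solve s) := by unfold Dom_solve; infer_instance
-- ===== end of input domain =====

-- B replaces A's left-to-right Horner loop (growing dict + zero_found flag + last counter + running
-- result) by a different evaluation strategy: one REVERSE pass accumulates, for every character, the
-- sum of base-powers of the positions it occupies; the answer is then the sum over DISTINCT characters
-- of digit-value × that weight. Objective: alternative (same asymptotic cost, different algorithm).

-- ===== PORT A =====
-- one loop iteration of A's for-loop (state: numbers, zero_found, last, result)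
def solveStep (base : Int) (st : PySem.Dict Char Int × Bool × Int × Int) (c : Char) :
    PySem.Dict Char Int × Bool × Int × Int :=
  match st with
  | (numbers, zero_found, last, result) =>
    match numbers.get? c with
    | some digit => (numbers, zero_found, last, result * base + digit)
    | none =>
      if zero_found then
        (numbers.insert c (last + 1), zero_found, last + 1, result * base + (last + 1))
      else
        (numbers.insert c 0, true, last, result * base + 0)

def solve (s : String) : Int :=
  let l := s.toList
  let digits := PySem.Set.ofList l
  let base : Int := max 2 (digits.length : Int)
  -- s[0]: IndexError on the empty string is excluded by Pre_solve; the default is never used inside Pre_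
  let first : Char := (PySem.List.pyGet? l 0).getD ' '
  let numbers : PySem.Dict Char Int := PySem.Dict.empty.insert first 1
  let fin := (l.drop 1).foldl (solveStep base) (numbers, false, 1, 1)
  fin.2.2.2

-- ===== PORT B =====
def solve_alt (s : String) : Int :=
  let l := s.toList
  let base : Int := max 2 ((PySem.Set.ofList l).length : Int)
  -- reverse pass: weight[c] += p; p *= base
  let wfin := l.reverse.foldl
      (fun (st : PySem.Dict Char Int × Int) c =>
        (st.1.insert c (st.1.getD c 0 + st.2), st.2 * base))
      (PySem.Dict.empty, 1)
  -- sum over distinct characters (first-appearance order) of digit-value * weight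
  (PySem.List.enumerate (PySem.List.dedup l) 0).foldl
    (fun tot p =>
      tot + (if p.1 = 0 then 1 else if p.1 = 1 then 0 else p.1) * wfin.1.getD p.2 0) 0

-- ===== PRECONDITION & SPEC =====
-- Pre_ excludes exactly the empty string, on which A raises IndexError at s[0].
def Pre_solve (s : String) : Prop := s ≠ ""
instance (s : String) : Decidable (Pre_solve s) := by unfold Pre_solve; infer_instance
def pvWitness_solve : String := "1021"

def Spec_solve (s : String) (out : Int) : Prop := out = solve_alt s
instance (s : String) (out : Int) : Decidable (Spec_solve s out) := by unfold Spec_solve; infer_instance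

-- ===== CLAIM (what is proved, stated in full; the proofs are below) =====
def Claim_equal_solve : Prop := ∀ (s : String), Dom_solve s → Pre_solve s → Spec_solve s (solve s)

-- ===== LEMMAS AND PROOFS =====

-- the digit value assigned to the i-th distinct character
def fVal (i : Int) : Int := if i = 0 then 1 else if i = 1 then 0 else i

-- B's value dict for a given first-appearance order list (proof-side description of A's dict)
def valD (order : List Char) : PySem.Dict Char Int :=
  (PySem.List.enumerate order 0).foldl
    (fun d p => d.insert p.2 (if p.1 = 0 then 1 else if p.1 = 1 then 0 else p.1))
    PySem.Dict.empty

-- ---- helper lemmas about Set.add / dedup ----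
lemma pvFoldlAddSuffix {α : Type} [BEq α] (q : List α) (d : PySem.Set α) :
    ∃ r, q.foldl PySem.Set.add d = d ++ r := by
  induction q generalizing d with
  | nil => exact ⟨[], by simp⟩
  | cons c q ih =>
    simp only [List.foldl_cons]
    have hadd : ∃ e, PySem.Set.add d c = d ++ e := by
      by_cases hc : List.contains d c = true
      · exact ⟨[], by simp [PySem.Set.add, PySem.Set.contains, hc]⟩
      · exact ⟨[c], by simp [PySem.Set.add, PySem.Set.contains, hc]⟩
    obtain ⟨e, he⟩ := hadd
    obtain ⟨r, hr⟩ := ih (PySem.Set.add d c)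
    exact ⟨e ++ r, by rw [hr, he, List.append_assoc]⟩

lemma pvDedupConsExists {α : Type} [BEq α] (c : α) (xs : List α) :
    ∃ r, PySem.List.dedup (c :: xs) = c :: r := by
  rw [PySem.List.dedup_eq_ofList, PySem.Set.ofList_eq_foldl]
  simp only [List.foldl_cons]
  have h0 : PySem.Set.add ([] : PySem.Set α) c = [c] := by simp [PySem.Set.add, PySem.Set.contains]
  rw [h0]
  obtain ⟨r, hr⟩ := pvFoldlAddSuffix xs [c]
  exact ⟨r, by simpa using hr⟩

lemma pvDedupAppendSingleton {α : Type} [BEq α] (xs : List α) (c : α) :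
    PySem.List.dedup (xs ++ [c]) = PySem.Set.add (PySem.List.dedup xs) c := by
  simp [PySem.List.dedup_eq_ofList, PySem.Set.ofList_eq_foldl, List.foldl_append]

lemma pvSetAddOfMem {α : Type} [BEq α] [LawfulBEq α] (d : PySem.Set α) (c : α) (h : c ∈ d) :
    PySem.Set.add d c = d := by
  simp [PySem.Set.add, PySem.Set.contains, h]

lemma pvSetAddOfNotMem {α : Type} [BEq α] [LawfulBEq α] (d : PySem.Set α) (c : α) (h : c ∉ d) :
    PySem.Set.add d c = d ++ [c] := by
  simp [PySem.Set.add, PySem.Set.contains, h]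

-- ---- lemmas about the value dict ----
lemma pvValDItems (order : List Char) (h : order.Nodup) :
    (valD order).items = (PySem.List.enumerate order 0).map (fun p => (p.2, fVal p.1)) := by
  unfold valD
  have := PySem.Dict.items_foldl_insert_fresh (l := PySem.List.enumerate order 0)
    (k := fun p => p.2) (v := fun p => fVal p.1) (d := (PySem.Dict.empty : PySem.Dict Char Int))
    (by intro a _; simp [PySem.Dict.contains_empty])
    (by rw [PySem.List.map_snd_enumerate]; exact h)
  simpa [fVal, PySem.Dict.items, PySem.Dict.empty] using this

lemma pvValDKeys (order : List Char) (h : order.Nodup) : (valD order).keys = order := by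
  simp only [PySem.Dict.keys, pvValDItems order h, List.map_map]
  have : ((fun p : Char × Int => p.1) ∘ fun p : Int × Char => (p.2, fVal p.1))
      = fun p : Int × Char => p.2 := rfl
  rw [this, PySem.List.map_snd_enumerate]

lemma pvValDGetElem (order : List Char) (h : order.Nodup) (k : Nat) (hk : k < order.length) :
    (valD order).get? order[k] = some (fVal k) := by
  apply PySem.Dict.get?_of_mem_items
  · rw [pvValDItems order h]
    apply List.mem_map.mpr
    refine ⟨(0 + (k : Int), order[k]), ?_, by simp⟩
    exact (PySem.List.mem_enumerate_iff _ _ _).mpr ⟨k, hk, rfl⟩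
  · rw [pvValDKeys order h]; exact h

-- ---- the A-side loop invariant ----
def InvA (l : List Char) (c0 : Char) (seen : List Char)
    (st : PySem.Dict Char Int × Bool × Int × Int) : Prop :=
  (∀ x : Char, st.1.get? x =
      if x ∈ PySem.List.dedup (c0 :: seen) then (valD (PySem.List.dedup l)).get? x else none)
  ∧ st.2.1 = decide (2 ≤ (PySem.List.dedup (c0 :: seen)).length)
  ∧ st.2.2.1 = (if (PySem.List.dedup (c0 :: seen)).length ≤ 1 then 1
      else ((PySem.List.dedup (c0 :: seen)).length : Int) - 1)
  ∧ st.2.2.2 = (c0 :: seen).foldl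
      (fun r c => r * max 2 ((PySem.List.dedup l).length : Int) + (valD (PySem.List.dedup l)).getD c 0) 0

lemma pvInvStep (l : List Char) (c0 c : Char) (seen q : List Char)
    (hl : c0 :: (seen ++ c :: q) = l)
    (st : PySem.Dict Char Int × Bool × Int × Int) (h : InvA l c0 seen st) :
    InvA l c0 (seen ++ [c]) (solveStep (max 2 ((PySem.List.dedup l).length : Int)) st c) := by
  obtain ⟨numbers, zf, last, result⟩ := st
  obtain ⟨hget, hzf, hlast, hres⟩ := h
  dsimp only at hget hzf hlast hres
  have hnodupL : (PySem.List.dedup l).Nodup := PySem.List.nodup_dedup l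
  have hd' : PySem.List.dedup (c0 :: (seen ++ [c]))
      = PySem.Set.add (PySem.List.dedup (c0 :: seen)) c := by
    have h1 : c0 :: (seen ++ [c]) = (c0 :: seen) ++ [c] := by simp
    rw [h1, pvDedupAppendSingleton]
  have hsplit : ∀ z : Int, List.foldl
      (fun r c => r * max 2 ((PySem.List.dedup l).length : Int) + (valD (PySem.List.dedup l)).getD c 0)
      z (c0 :: (seen ++ [c]))
      = (List.foldl (fun r c => r * max 2 ((PySem.List.dedup l).length : Int) + (valD (PySem.List.dedup l)).getD c 0) z (c0 :: seen))
        * max 2 ((PySem.List.dedup l).length : Int) + (valD (PySem.List.dedup l)).getD c 0 := by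
    intro z
    rw [show c0 :: (seen ++ [c]) = (c0 :: seen) ++ [c] from by simp, List.foldl_append]
    rfl
  by_cases hmem : c ∈ PySem.List.dedup (c0 :: seen)
  · -- repeated character: dict lookup succeeds
    have hcl : c ∈ PySem.List.dedup l := by
      rw [PySem.List.mem_dedup]
      rw [← hl]; simp
    have hsome : ∃ v, (valD (PySem.List.dedup l)).get? c = some v := by
      rcases hcv : (valD (PySem.List.dedup l)).get? c with _ | v
      · exact absurd ((PySem.Dict.get?_eq_none_iff_not_mem_keys _ _).mp hcv)
          (by rw [pvValDKeys _ hnodupL]; exact fun h' => h' hcl)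
      · exact ⟨v, rfl⟩
    obtain ⟨v, hv⟩ := hsome
    have hnum : numbers.get? c = some v := by rw [hget c, if_pos hmem, hv]
    have hstep : solveStep (max 2 ((PySem.List.dedup l).length : Int)) (numbers, zf, last, result) c
        = (numbers, zf, last, result * max 2 ((PySem.List.dedup l).length : Int) + v) := by
      simp [solveStep, hnum]
    have hdeq : PySem.List.dedup (c0 :: (seen ++ [c])) = PySem.List.dedup (c0 :: seen) := by
      rw [hd', pvSetAddOfMem _ _ hmem]
    unfold InvA
    rw [hstep, hdeq]
    dsimp only
    refine ⟨hget, hzf, hlast, ?_⟩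
    rw [hsplit, ← hres, PySem.Dict.getD_eq_get?_getD, hv]
    rfl
  · -- new character
    have hnum : numbers.get? c = none := by rw [hget c, if_neg hmem]
    have horder : ∃ r, PySem.List.dedup l = PySem.List.dedup (c0 :: seen) ++ c :: r := by
      have h1 : PySem.List.dedup l
          = (c :: q).foldl PySem.Set.add (PySem.List.dedup (c0 :: seen)) := by
        rw [← hl, PySem.List.dedup_eq_ofList, PySem.Set.ofList_eq_foldl,
            PySem.List.dedup_eq_ofList, PySem.Set.ofList_eq_foldl]
        have h2 : c0 :: (seen ++ c :: q) = (c0 :: seen) ++ (c :: q) := by simp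
        rw [h2, List.foldl_append]
      rw [h1]
      simp only [List.foldl_cons]
      rw [pvSetAddOfNotMem _ _ hmem]
      obtain ⟨r, hr⟩ := pvFoldlAddSuffix q (PySem.List.dedup (c0 :: seen) ++ [c])
      exact ⟨r, by rw [hr]; simp⟩
    obtain ⟨r, hr⟩ := horder
    set d := PySem.List.dedup (c0 :: seen) with hdref
    have hlen : d.length < (PySem.List.dedup l).length := by rw [hr]; simp
    have hgetc : (PySem.List.dedup l)[d.length]'hlen = c := by
      rw [List.getElem_of_eq hr]
      rw [List.getElem_append_right (le_refl d.length)]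
      simp
    have hvalc : (valD (PySem.List.dedup l)).get? c = some (fVal d.length) := by
      have h3 := pvValDGetElem (PySem.List.dedup l) hnodupL d.length hlen
      rwa [hgetc] at h3
    have hd1 : 1 ≤ d.length := by
      obtain ⟨r', hr'⟩ := pvDedupConsExists c0 seen
      rw [hdref, hr']; simp
    have hdeq : PySem.List.dedup (c0 :: (seen ++ [c])) = d ++ [c] := by
      rw [hd', pvSetAddOfNotMem _ _ hmem]
    have hgetGoal : ∀ (w : Int), (valD (PySem.List.dedup l)).get? c = some w →
        ∀ x : Char, (numbers.insert c w).get? x =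
          if x ∈ PySem.List.dedup (c0 :: (seen ++ [c])) then (valD (PySem.List.dedup l)).get? x
          else none := by
      intro w hw x
      rw [PySem.Dict.get?_insert]
      by_cases hx : x = c
      · rw [if_pos hx, hx, if_pos (by rw [hdeq]; simp), hw]
      · rw [if_neg hx, hget x]
        have hiff : x ∈ PySem.List.dedup (c0 :: (seen ++ [c])) ↔ x ∈ d := by
          rw [hdeq]; simp [hx]
        by_cases hxd : x ∈ d
        · rw [if_pos hxd, if_pos (hiff.mpr hxd)]
        · rw [if_neg hxd, if_neg (fun h' => hxd (hiff.mp h'))]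
    by_cases hzf2 : 2 ≤ d.length
    · -- zero already assigned: new digit is last + 1
      have hzft : zf = true := by rw [hzf]; simp [hzf2]
      have hlastv : last = (d.length : Int) - 1 := by
        rw [hlast, if_neg (by omega)]
      have hfv : fVal (d.length : Int) = (d.length : Int) := by
        unfold fVal
        rw [if_neg (by omega), if_neg (by omega)]
      have hdig : last + 1 = (d.length : Int) := by rw [hlastv]; ring
      have hstep : solveStep (max 2 ((PySem.List.dedup l).length : Int)) (numbers, zf, last, result) c
          = (numbers.insert c (last + 1), zf, last + 1,
              result * max 2 ((PySem.List.dedup l).length : Int) + (last + 1)) := by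
        simp [solveStep, hnum, hzft]
      unfold InvA
      rw [hstep]
      dsimp only
      refine ⟨?_, ?_, ?_, ?_⟩
      · exact hgetGoal (last + 1) (by rw [hvalc, hfv, hdig])
      · rw [hzf, hdeq]
        simp only [decide_eq_decide, List.length_append, List.length_cons, List.length_nil]
        omega
      · rw [hdeq]
        simp only [List.length_append, List.length_cons, List.length_nil]
        rw [if_neg (by omega), hlastv]
        push_cast
        ring
      · rw [hsplit, ← hres, PySem.Dict.getD_eq_get?_getD, hvalc, hfv, hdig]
        rfl
    · -- first new character: gets digit 0
      have hd1' : d.length = 1 := by omega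
      have hzff : zf = false := by rw [hzf]; simp; omega
      have hfv : fVal (d.length : Int) = 0 := by
        unfold fVal
        rw [hd1']
        norm_num
      have hstep : solveStep (max 2 ((PySem.List.dedup l).length : Int)) (numbers, zf, last, result) c
          = (numbers.insert c 0, true, last,
              result * max 2 ((PySem.List.dedup l).length : Int) + 0) := by
        simp [solveStep, hnum, hzff]
      unfold InvA
      rw [hstep]
      dsimp only
      refine ⟨?_, ?_, ?_, ?_⟩
      · exact hgetGoal 0 (by rw [hvalc, hfv])
      · rw [hdeq]
        simp only [List.length_append, List.length_cons, List.length_nil]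
        exact (decide_eq_true (by omega)).symm
      · rw [hdeq]
        simp only [List.length_append, List.length_cons, List.length_nil]
        rw [if_neg (by omega), hlast, if_pos (by omega), hd1']
        norm_num
      · rw [hsplit, ← hres, PySem.Dict.getD_eq_get?_getD, hvalc, hfv]
        rfl

lemma pvInvFold (l : List Char) (c0 : Char) (q : List Char) : ∀ (seen : List Char)
    (st : PySem.Dict Char Int × Bool × Int × Int),
    c0 :: (seen ++ q) = l → InvA l c0 seen st →
    InvA l c0 (seen ++ q) (q.foldl (solveStep (max 2 ((PySem.List.dedup l).length : Int))) st) := by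
  induction q with
  | nil => intro seen st _ h; simpa using h
  | cons c q ih =>
    intro seen st hl h
    have h1 := pvInvStep l c0 c seen q hl st h
    have h2 := ih (seen ++ [c]) _ (by simpa using hl) h1
    simpa using h2

lemma pvDedupSingleton (c : Char) : PySem.List.dedup [c] = [c] := by
  simp [PySem.List.dedup_eq_ofList, PySem.Set.ofList_eq_foldl, PySem.Set.add, PySem.Set.contains]

-- A's result is the left-to-right Horner fold of the digit values
lemma pvMain (c0 : Char) (t : List Char) :
    ((t.foldl (solveStep (max 2 ((PySem.List.dedup (c0 :: t)).length : Int)))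
      ((PySem.Dict.empty : PySem.Dict Char Int).insert c0 1, false, 1, 1))).2.2.2
    = (c0 :: t).foldl
        (fun r c => r * max 2 ((PySem.List.dedup (c0 :: t)).length : Int)
          + (valD (PySem.List.dedup (c0 :: t))).getD c 0) 0 := by
  have hnodupL : (PySem.List.dedup (c0 :: t)).Nodup := PySem.List.nodup_dedup _
  have hhead : ∃ r, PySem.List.dedup (c0 :: t) = c0 :: r := pvDedupConsExists c0 t
  obtain ⟨r, hr⟩ := hhead
  have hval0 : (valD (PySem.List.dedup (c0 :: t))).get? c0 = some 1 := by
    have hlen : 0 < (PySem.List.dedup (c0 :: t)).length := by rw [hr]; simp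
    have h0 := pvValDGetElem (PySem.List.dedup (c0 :: t)) hnodupL 0 hlen
    have hg : (PySem.List.dedup (c0 :: t))[0]'hlen = c0 := by
      rw [List.getElem_of_eq hr]; rfl
    rw [hg] at h0
    simpa [fVal] using h0
  have hinit : InvA (c0 :: t) c0 [] ((PySem.Dict.empty : PySem.Dict Char Int).insert c0 1, false, 1, 1) := by
    refine ⟨?_, ?_, ?_, ?_⟩
    · intro x
      dsimp only
      rw [PySem.Dict.get?_insert, pvDedupSingleton c0]
      by_cases hx : x = c0
      · rw [if_pos hx, if_pos (by simp [hx]), hx, hval0]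
      · rw [if_neg hx, if_neg (by simp [hx]), PySem.Dict.get?_empty]
    · dsimp only; rw [pvDedupSingleton c0]; rfl
    · dsimp only; rw [pvDedupSingleton c0]; rfl
    · dsimp only
      simp only [List.foldl_cons, List.foldl_nil]
      rw [PySem.Dict.getD_eq_get?_getD, hval0]
      simp
  have h := pvInvFold (c0 :: t) c0 t [] _ (by simp) hinit
  simpa using h.2.2.2

-- ---- B-side lemmas: the weight dict and the grouped-sum identity ----

-- positional weight of character c in l: sum of base^(distance from the end - 1) over occurrences
def wsum (base : Int) : List Char → Char → Int
  | [], _ => 0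
  | a :: t, c => (if a = c then base ^ t.length else 0) + wsum base t c

def wfold (base : Int) (l : List Char) : PySem.Dict Char Int × Int :=
  l.reverse.foldl
    (fun (st : PySem.Dict Char Int × Int) c =>
      (st.1.insert c (st.1.getD c 0 + st.2), st.2 * base))
    (PySem.Dict.empty, 1)

lemma pvWfoldCons (base : Int) (a : Char) (t : List Char) :
    wfold base (a :: t)
      = ((wfold base t).1.insert a ((wfold base t).1.getD a 0 + (wfold base t).2),
         (wfold base t).2 * base) := by
  unfold wfold
  rw [List.reverse_cons, List.foldl_append]
  rfl

lemma pvWfoldSnd (base : Int) (l : List Char) : (wfold base l).2 = base ^ l.length := by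
  induction l with
  | nil => simp [wfold]
  | cons a t ih => rw [pvWfoldCons, ih]; rw [List.length_cons]; ring

lemma pvWfoldGetD (base : Int) (l : List Char) (c : Char) :
    (wfold base l).1.getD c 0 = wsum base l c := by
  induction l with
  | nil =>
    simp [wfold, wsum, PySem.Dict.getD_eq_get?_getD, PySem.Dict.get?_empty]
  | cons a t ih =>
    rw [pvWfoldCons, wsum]
    dsimp only
    rw [PySem.Dict.getD_insert]
    by_cases hc : c = a
    · subst hc
      rw [if_pos rfl, if_pos rfl, ih, pvWfoldSnd]; ring
    · rw [if_neg hc, if_neg (fun h => hc h.symm), ih]; ring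

-- a sum of 'if c = a then g c else 0' over a nodup list containing a is g a
lemma pvSumIteNodup (g : Char → Int) (a : Char) :
    ∀ (d : List Char), d.Nodup → a ∈ d →
      (d.map (fun c => if c = a then g c else 0)).sum = g a := by
  intro d
  induction d with
  | nil => intro _ h; simp at h
  | cons b d ih =>
    intro hnod hmem
    rcases List.mem_cons.mp hmem with hba | had
    · subst hba
      have : ∀ c ∈ d, (if c = a then g c else 0) = 0 := by
        intro c hc
        rw [if_neg]
        intro h; subst h; exact (List.nodup_cons.mp hnod).1 hc
      simp [List.map_congr_left this]
    · have hb : ¬ b = a := by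
        intro h; subst h; exact (List.nodup_cons.mp hnod).1 had
      simp only [List.map_cons, List.sum_cons, if_neg hb, zero_add]
      exact ih (List.nodup_cons.mp hnod).2 had

-- Horner evaluation = weighted sum grouped by (distinct) character
lemma pvHornerGrouped (base : Int) (d : List Char) (hd : d.Nodup) (g : Char → Int) :
    ∀ (l : List Char) (z : Int), (∀ x ∈ l, x ∈ d) →
      l.foldl (fun r c => r * base + g c) z
        = z * base ^ l.length + (d.map (fun c => g c * wsum base l c)).sum := by
  intro l
  induction l with
  | nil =>
    intro z _
    have : d.map (fun c => g c * wsum base [] c) = d.map (fun _ => (0 : Int)) := by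
      apply List.map_congr_left; intro x _; simp [wsum]
    simp [this]
  | cons a t ih =>
    intro z hsub
    have ha : a ∈ d := hsub a (by simp)
    have hsub' : ∀ x ∈ t, x ∈ d := fun x hx => hsub x (by simp [hx])
    rw [List.foldl_cons, ih (z * base + g a) hsub']
    have hsplit : d.map (fun c => g c * wsum base (a :: t) c)
        = d.map (fun c => (if c = a then g c * base ^ t.length else 0) + g c * wsum base t c) := by
      apply List.map_congr_left
      intro c _
      rw [wsum]
      by_cases hc : a = c
      · subst hc; simp [mul_add]
      · rw [if_neg hc, if_neg (fun h => hc h.symm)]; ring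
    rw [hsplit, PySem.List.sum_map_add_int,
        pvSumIteNodup (fun c => g c * base ^ t.length) a d hd ha]
    rw [List.length_cons]
    ring

-- B's fold over enumerate(dedup l), stated in the port's own terms, as a grouped sum
lemma pvBsum (base : Int) (l : List Char) :
    (PySem.List.enumerate (PySem.List.dedup l) 0).foldl
      (fun tot p => tot + (if p.1 = 0 then 1 else if p.1 = 1 then 0 else p.1)
        * (l.reverse.foldl
            (fun (st : PySem.Dict Char Int × Int) c =>
              (st.1.insert c (st.1.getD c 0 + st.2), st.2 * base))
            (PySem.Dict.empty, 1)).1.getD p.2 0) 0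
    = ((PySem.List.dedup l).map
        (fun c => (valD (PySem.List.dedup l)).getD c 0 * wsum base l c)).sum := by
  have hw : l.reverse.foldl
      (fun (st : PySem.Dict Char Int × Int) c =>
        (st.1.insert c (st.1.getD c 0 + st.2), st.2 * base))
      (PySem.Dict.empty, 1) = wfold base l := rfl
  rw [hw, PySem.List.foldl_add]
  have hmapc : (PySem.List.enumerate (PySem.List.dedup l) 0).map
      (fun p => (if p.1 = 0 then 1 else if p.1 = 1 then 0 else p.1)
        * (wfold base l).1.getD p.2 0)
      = (PySem.List.enumerate (PySem.List.dedup l) 0).map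
          (fun p => (valD (PySem.List.dedup l)).getD p.2 0 * wsum base l p.2) := by
    apply List.map_congr_left
    intro p hp
    obtain ⟨k, hk, hpk⟩ := (PySem.List.mem_enumerate_iff _ _ _).mp hp
    subst hpk
    dsimp only
    rw [pvWfoldGetD]
    have hgk : (valD (PySem.List.dedup l)).getD (PySem.List.dedup l)[k] 0 = fVal k := by
      rw [PySem.Dict.getD_eq_get?_getD,
        pvValDGetElem (PySem.List.dedup l) (PySem.List.nodup_dedup l) k hk]
      rfl
    rw [hgk]
    simp [fVal]
  rw [hmapc]
  have hsnd : (PySem.List.enumerate (PySem.List.dedup l) 0).map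
      (fun p => (valD (PySem.List.dedup l)).getD p.2 0 * wsum base l p.2)
      = ((PySem.List.enumerate (PySem.List.dedup l) 0).map (fun p : Int × Char => p.2)).map
          (fun c => (valD (PySem.List.dedup l)).getD c 0 * wsum base l c) := by
    rw [List.map_map]; rfl
  rw [hsnd, PySem.List.map_snd_enumerate]
  simp

theorem solve_spec : Claim_equal_solve := by
  unfold Claim_equal_solve Spec_solve
  intro s _ hpre
  have hl : s.toList ≠ [] := by
    intro h
    exact hpre (by
      have h2 := congrArg String.ofList h
      simpa using h2)
  obtain ⟨c0, t, hct⟩ : ∃ c0 t, s.toList = c0 :: t := by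
    cases h : s.toList with
    | nil => exact absurd h hl
    | cons a b => exact ⟨a, b, rfl⟩
  unfold solve solve_alt
  simp only [hct, List.drop_succ_cons, List.drop_zero]
  have hfirst : (PySem.List.pyGet? (c0 :: t) (0 : Int)).getD ' ' = c0 := by
    simp [PySem.List.pyGet?, PySem.List.pyIdx?]
  rw [hfirst]
  have hbase : PySem.Set.ofList (c0 :: t) = PySem.List.dedup (c0 :: t) :=
    (PySem.List.dedup_eq_ofList _).symm
  rw [hbase]
  rw [pvMain c0 t, pvBsum (max 2 ((PySem.List.dedup (c0 :: t)).length : Int)) (c0 :: t)]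
  have := pvHornerGrouped (max 2 ((PySem.List.dedup (c0 :: t)).length : Int))
    (PySem.List.dedup (c0 :: t)) (PySem.List.nodup_dedup _)
    (fun c => (valD (PySem.List.dedup (c0 :: t))).getD c 0) (c0 :: t) 0
    (fun x hx => (PySem.List.mem_dedup _ _).mpr hx)
  simpa using this
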